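-- pv_equiv track=rewrite | github.com/shahmeer99/HCT-QA-Benchmark | scripts/score_model_responses/score_responses.py | results_to_per_dataset_results_vision
-- ===== SOURCE A (Python) =====
-- def results_to_per_dataset_results_vision(results):
--     # Create a dictionary to hold the results for each dataset
--     dataset_results = {}
--     # Iterate through the results and group them by dataset
--     for result in results:
--         dataset = result['id'].split("--")[0]
--         if dataset not in dataset_results:
--             dataset_results[dataset] = [result]
--         else:
--             dataset_results[dataset].append(result)
--     return dataset_results
-- ===== SOURCE B (Python) =====
-- def results_to_per_dataset_results_vision(results):
--     # Two-phase grouping: collect distinct dataset keys in first-occurrence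
--     # order, then build each group with one filtering comprehension per key.
--     keys = []
--     for result in results:
--         k = result['id'].split("--")[0]
--         if k not in keys:
--             keys.append(k)
--     return {k: [r for r in results if r['id'].split("--")[0] == k]
--             for k in keys}
-- ===== Notes on version B (the rewrite author's own statement) =====
-- stated objective: alternative
-- what changed: Replaces the single-pass dict bucketing (append to a per-key list held in the dict) by a two-phase scheme: first an ordered dedup pass collecting the distinct dataset keys, then one filtering comprehension per key building each group directly from the input.
import Mathlib
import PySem

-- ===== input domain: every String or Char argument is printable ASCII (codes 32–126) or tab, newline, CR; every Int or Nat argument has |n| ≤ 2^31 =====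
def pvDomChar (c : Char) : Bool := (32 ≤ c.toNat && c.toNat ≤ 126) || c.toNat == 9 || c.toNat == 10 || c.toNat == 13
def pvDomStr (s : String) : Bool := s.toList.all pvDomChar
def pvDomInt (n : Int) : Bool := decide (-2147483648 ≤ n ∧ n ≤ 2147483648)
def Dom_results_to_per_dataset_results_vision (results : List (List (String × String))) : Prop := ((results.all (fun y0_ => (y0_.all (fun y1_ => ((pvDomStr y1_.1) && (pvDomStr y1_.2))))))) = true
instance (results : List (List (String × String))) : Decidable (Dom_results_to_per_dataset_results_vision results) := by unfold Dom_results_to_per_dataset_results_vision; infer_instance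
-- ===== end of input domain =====

-- B replaces A's single-pass dict bucketing by an ordered-dedup key pass followed by one filter per key; same grouped dict (alternative decomposition, not faster).


-- ===== PORT A =====
-- result['id'].split("--")[0]; exact under Pre_ (the "id" key is present; split never returns [])
def pvKeyOf (r : List (String × String)) : String :=
  (((PySem.Str.split? (PySem.Dict.getD (PySem.Dict.mk r) "id" "") "--").getD []).headD "")

def results_to_per_dataset_results_vision (results : List (List (String × String))) : List (String × List (List (String × String))) :=
  (results.foldl (fun d result =>
      let dataset := pvKeyOf result
      if d.contains dataset = false then d.insert dataset [result]
      else d.modify dataset [] (· ++ [result]))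
    PySem.Dict.empty).items

-- ===== PORT B =====
def results_to_per_dataset_results_vision_alt (results : List (List (String × String))) : List (String × List (List (String × String))) :=
  let keys := results.foldl (fun ks result =>
      let k := pvKeyOf result
      if ks.contains k then ks else ks ++ [k]) ([] : List String)
  keys.map (fun k => (k, results.filter (fun r => pvKeyOf r == k)))

-- ===== PRECONDITION & SPEC =====
-- Pre_ excludes only inputs where some result lacks the "id" key, on which the Python A raises KeyError.
def Pre_results_to_per_dataset_results_vision (results : List (List (String × String))) : Prop :=
  (results.all (fun r => r.any (fun p => p.1 == "id"))) = true
instance (results : List (List (String × String))) : Decidable (Pre_results_to_per_dataset_results_vision results) := by unfold Pre_results_to_per_dataset_results_vision; infer_instance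

def pvWitness_results_to_per_dataset_results_vision : (List (List (String × String))) :=
  [[("id", "ds1--q1"), ("resp", "7")], [("id", "ds2--q1")], [("id", "ds1--q2"), ("resp", "8")]]

def Spec_results_to_per_dataset_results_vision (results : List (List (String × String))) (out : List (String × List (List (String × String)))) : Prop := out = results_to_per_dataset_results_vision_alt results
instance (results : List (List (String × String))) (out : List (String × List (List (String × String)))) : Decidable (Spec_results_to_per_dataset_results_vision results out) := by unfold Spec_results_to_per_dataset_results_vision; infer_instance

-- ===== CLAIM (what is proved, stated in full; the proofs are below) =====
def Claim_equal_results_to_per_dataset_results_vision : Prop := ∀ (results : List (List (String × String))), Dom_results_to_per_dataset_results_vision results → Pre_results_to_per_dataset_results_vision results → Spec_results_to_per_dataset_results_vision results (results_to_per_dataset_results_vision results)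

-- ===== LEMMAS AND PROOFS =====

-- A's loop body equals an unconditional modify-append
theorem pvStepA_eq (d : PySem.Dict String (List (List (String × String)))) (r : List (String × String)) :
    (if d.contains (pvKeyOf r) = false then d.insert (pvKeyOf r) [r]
     else d.modify (pvKeyOf r) [] (· ++ [r])) = d.modify (pvKeyOf r) [] (· ++ [r]) := by
  by_cases h : d.contains (pvKeyOf r) = false
  · simp [h, PySem.Dict.modify, PySem.Dict.getD_of_not_contains _ _ h]
  · simp [h]

theorem pvA_fold_eq (results : List (List (String × String))) :
    results_to_per_dataset_results_vision results
      = ((results.map (fun r => (pvKeyOf r, r))).foldl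
          (fun d p => d.modify p.1 [] (· ++ [p.2])) PySem.Dict.empty).items := by
  unfold results_to_per_dataset_results_vision
  rw [List.foldl_map]
  congr 2
  funext d r
  exact pvStepA_eq d r

theorem pvB_keys_eq (results : List (List (String × String))) :
    results.foldl (fun ks result =>
        let k := pvKeyOf result
        if ks.contains k then ks else ks ++ [k]) ([] : List String)
      = PySem.Set.ofList (results.map pvKeyOf) := by
  rw [PySem.Set.ofList_eq_foldl, List.foldl_map]
  rfl

theorem pvGroup_filter (results : List (List (String × String))) (k : String) :
    ((results.map (fun r => (pvKeyOf r, r))).filter (fun p => p.1 == k)).map (·.2)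
      = results.filter (fun r => pvKeyOf r == k) := by
  induction results with
  | nil => rfl
  | cons r rs ih =>
    by_cases h : pvKeyOf r == k <;> simp [h, ih]

-- ===== VERDICT (by name: the statement is the Claim_ definition above) =====
theorem results_to_per_dataset_results_vision_spec : Claim_equal_results_to_per_dataset_results_vision := by
  intro results _ _
  unfold Spec_results_to_per_dataset_results_vision results_to_per_dataset_results_vision_alt
  rw [pvA_fold_eq, pvB_keys_eq]
  set ps := results.map (fun r => (pvKeyOf r, r)) with hps
  have hnd : ((ps.foldl (fun d p => d.modify p.1 [] (· ++ [p.2])) PySem.Dict.empty)).keys.Nodup := by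
    exact PySem.Dict.nodup_keys_foldl_modify_key ps (fun p => p.1)
      ([] : List (List (String × String)))
      (fun _ p => (· ++ [p.2]))
      (PySem.Dict.empty)
      PySem.Dict.nodup_keys_empty
  rw [PySem.Dict.items_eq_map_keys _ hnd ([] : List (List (String × String)))]
  have hkeys : ((ps.foldl (fun d p => d.modify p.1 [] (· ++ [p.2])) PySem.Dict.empty)).keys
      = PySem.Set.ofList (results.map pvKeyOf) := by
    rw [PySem.Dict.keys_foldl_modify_key ps (fun p => p.1)
      ([] : List (List (String × String)))
      (fun _ p => (· ++ [p.2]))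
      (PySem.Dict.empty),
      PySem.Dict.keys_empty, PySem.Set.update_nil_left, hps, List.map_map]
    rfl
  rw [hkeys]
  apply List.map_congr_left
  intro k _
  rw [PySem.Dict.getD_foldl_modify_append, PySem.Dict.getD_empty, List.nil_append,
    pvGroup_filter]
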